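-- pv_equiv track=rewrite | github.com/dkalke/MiniWebServer | WebServer/WebServer.py | LoginCheck
-- ===== SOURCE A (Python) =====
-- def LoginCheck(tokens):
--   auth = ''
--   for i in tokens:
--     if i.find('Cookie') == 0:
--       auth = i[8:]
--       if auth.find('auth') == 0:
--         auth = auth[6:-1]
--   return auth
-- ===== SOURCE B (Python) =====
-- def LoginCheck(tokens):
--   for i in reversed(tokens):
--     if i.find('Cookie') == 0:
--       auth = i[8:]
--       if auth.find('auth') == 0:
--         auth = auth[6:-1]
--       return auth
--   return ''
-- ===== Notes on version B (the rewrite author's own statement) =====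
-- stated objective: alternative
-- what changed: Replaces the forward full scan that keeps overwriting auth with a reversed scan that returns at the first (i.e. last overall) Cookie token, defaulting to '' if none.
import Mathlib
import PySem

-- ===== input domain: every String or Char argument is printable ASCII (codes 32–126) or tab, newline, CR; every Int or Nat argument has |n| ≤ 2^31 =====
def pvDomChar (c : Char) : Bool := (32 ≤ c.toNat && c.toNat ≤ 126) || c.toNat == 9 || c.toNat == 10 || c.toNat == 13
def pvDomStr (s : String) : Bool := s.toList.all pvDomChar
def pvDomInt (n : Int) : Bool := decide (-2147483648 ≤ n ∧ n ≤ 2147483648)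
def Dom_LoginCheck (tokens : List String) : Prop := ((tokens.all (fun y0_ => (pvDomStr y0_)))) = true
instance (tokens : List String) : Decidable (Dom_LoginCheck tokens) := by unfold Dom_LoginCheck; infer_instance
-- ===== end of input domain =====

-- B replaces A's forward scan-and-overwrite by a reversed scan that returns at the first
-- (overall last) Cookie token; alternative decomposition, same result.

-- ===== PORT A =====
-- forward loop over tokens, overwriting auth at each Cookie token
def LoginCheck (tokens : List String) : String :=
  tokens.foldl (fun auth i =>
    if PySem.Str.find i "Cookie" = 0 then
      let a := PySem.Str.slice i (some 8) none
      if PySem.Str.find a "auth" = 0 then PySem.Str.slice a (some 6) (some (-1)) else a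
    else auth) ""

-- ===== PORT B =====
-- Source B's loop body: extract the auth value from one Cookie token
def pvExtract (i : String) : String :=
  let a := PySem.Str.slice i (some 8) none
  if PySem.Str.find a "auth" = 0 then PySem.Str.slice a (some 6) (some (-1)) else a

-- Source B's 'for i in reversed(tokens): … return', as structural recursion on the reversed list
def pvScan : List String → String
  | [] => ""
  | i :: rest => if PySem.Str.find i "Cookie" = 0 then pvExtract i else pvScan rest

def LoginCheck_alt (tokens : List String) : String := pvScan tokens.reverse

-- ===== PRECONDITION & SPEC =====
def Spec_LoginCheck (tokens : List String) (out : String) : Prop := out = LoginCheck_alt tokens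
instance (tokens : List String) (out : String) : Decidable (Spec_LoginCheck tokens out) := by unfold Spec_LoginCheck; infer_instance

-- ===== CLAIM (what is proved, stated in full; the proofs are below) =====
def Claim_equal_LoginCheck : Prop := ∀ (tokens : List String), Dom_LoginCheck tokens → Spec_LoginCheck tokens (LoginCheck tokens)

-- ===== LEMMAS AND PROOFS =====

-- the shared test on one token
def pvCookie (i : String) : Bool := decide (PySem.Str.find i "Cookie" = 0)

-- B's scan returns the first match (mapped through pvExtract), defaulting
theorem pvScan_eq_find? (xs : List String) :
    pvScan xs = ((xs.find? pvCookie).map pvExtract).getD "" := by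
  induction xs with
  | nil => rfl
  | cons i rest ih =>
    simp only [pvScan, List.find?, pvCookie]
    by_cases h : PySem.Str.find i "Cookie" = 0
    · rw [if_pos h, decide_eq_true h]; simp
    · rw [if_neg h, decide_eq_false h]; exact ih

-- A's fold keeps the last match: it equals the first match of the reversed list, default acc
theorem foldl_eq_find?_reverse (xs : List String) (acc : String) :
    xs.foldl (fun auth i =>
      if PySem.Str.find i "Cookie" = 0 then pvExtract i else auth) acc
    = ((xs.reverse.find? pvCookie).map pvExtract).getD acc := by
  induction xs generalizing acc with
  | nil => rfl
  | cons i rest ih =>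
    simp only [List.foldl_cons, List.reverse_cons, List.find?_append, ih]
    cases hf : rest.reverse.find? pvCookie with
    | some v => simp
    | none =>
      simp only [List.find?, pvCookie]
      by_cases h : PySem.Str.find i "Cookie" = 0
      · rw [if_pos h, decide_eq_true h]; simp
      · rw [if_neg h, decide_eq_false h]; simp

-- ===== VERDICT (by name: the statement is the Claim_ definition above) =====
theorem LoginCheck_spec : Claim_equal_LoginCheck := by
  intro tokens _
  show LoginCheck tokens = LoginCheck_alt tokens
  unfold LoginCheck LoginCheck_alt
  rw [pvScan_eq_find?]
  exact foldl_eq_find?_reverse tokens ""
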